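-- pv_equiv track=rewrite | github.com/omaksi/programovanie1 | cvicenia/cvicenie12/6.py | sucet2
-- ===== SOURCE A (Python) =====
-- def sucet2(zoznam):
--     if len(zoznam) == 0:
--         return (0, 0)
--     if len(zoznam) == 1:
--         if zoznam[0] < 0:
--             return (zoznam[0], 0)
--         else:
--             return (0, zoznam[0])
--     stred = len(zoznam) // 2
--     prva = sucet2(zoznam[:stred])
--     druha = sucet2(zoznam[stred:])
--     return (prva[0]+druha[0], prva[1]+druha[1])
-- ===== SOURCE B (Python) =====
-- def sucet2(zoznam):
--     neg = 0
--     pos = 0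
--     for x in zoznam:
--         if x < 0:
--             neg += x
--         else:
--             pos += x
--     return (neg, pos)
-- ===== Notes on version B (the rewrite author's own statement) =====
-- stated objective: faster
-- what changed: Replaced the divide-and-conquer recursion with slicing (which copies sublists at every level) by a single iterative pass accumulating the two sums.
import Mathlib
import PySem

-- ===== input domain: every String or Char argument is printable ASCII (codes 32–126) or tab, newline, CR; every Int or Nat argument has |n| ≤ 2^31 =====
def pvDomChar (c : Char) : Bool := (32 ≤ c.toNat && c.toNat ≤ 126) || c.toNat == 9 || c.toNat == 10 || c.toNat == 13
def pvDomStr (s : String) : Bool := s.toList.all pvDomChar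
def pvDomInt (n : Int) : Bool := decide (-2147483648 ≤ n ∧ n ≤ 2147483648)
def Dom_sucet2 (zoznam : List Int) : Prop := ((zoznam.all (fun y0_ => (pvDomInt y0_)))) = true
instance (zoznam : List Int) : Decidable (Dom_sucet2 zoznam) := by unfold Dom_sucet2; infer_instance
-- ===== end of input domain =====

-- B replaces A's divide-and-conquer recursion by one iterative accumulating pass (objective: simpler).

-- ===== PORT A =====
-- A: recursive halving with slices; singleton case inspects zoznam[0] (always in range when length = 1).
def sucet2 (zoznam : List Int) : Int × Int :=
  if _h0 : zoznam.length = 0 then (0, 0)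
  else if _h1 : zoznam.length = 1 then
    match PySem.List.pyGet? zoznam 0 with
    | some x => if x < 0 then (x, 0) else (0, x)
    | none => (0, 0)  -- unreachable: length = 1 so index 0 is in range
  else
    let stred : Int := PySem.Int.floordiv (zoznam.length : Int) 2
    let prva := sucet2 (PySem.List.slice zoznam none (some stred))
    let druha := sucet2 (PySem.List.slice zoznam (some stred) none)
    (prva.1 + druha.1, prva.2 + druha.2)
termination_by zoznam.length
decreasing_by
  · rw [PySem.Int.floordiv_eq_ediv_of_pos (by omega),
        PySem.List.slice_to zoznam (show (0:Int) ≤ (zoznam.length : Int) / 2 by positivity)]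
    simp only [List.length_take]
    omega
  · rw [PySem.Int.floordiv_eq_ediv_of_pos (by omega),
        PySem.List.slice_from zoznam (show (0:Int) ≤ (zoznam.length : Int) / 2 by positivity)]
    simp only [List.length_drop]
    omega

-- ===== PORT B =====
-- B: one pass, pair accumulator (neg, pos); x < 0 goes to neg, else to pos.
def sucet2_alt (zoznam : List Int) : Int × Int :=
  zoznam.foldl (fun acc x => if x < 0 then (acc.1 + x, acc.2) else (acc.1, acc.2 + x)) (0, 0)

-- ===== PRECONDITION & SPEC =====
def Spec_sucet2 (zoznam : List Int) (out : Int × Int) : Prop := out = sucet2_alt zoznam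
instance (zoznam : List Int) (out : Int × Int) : Decidable (Spec_sucet2 zoznam out) := by unfold Spec_sucet2; infer_instance

-- ===== CLAIM (what is proved, stated in full; the proofs are below) =====
def Claim_equal_sucet2 : Prop := ∀ (zoznam : List Int), Dom_sucet2 zoznam → Spec_sucet2 zoznam (sucet2 zoznam)

-- ===== LEMMAS AND PROOFS =====

def nsum : List Int → Int
  | [] => 0
  | x :: xs => (if x < 0 then x else 0) + nsum xs

def psum : List Int → Int
  | [] => 0
  | x :: xs => (if x < 0 then 0 else x) + psum xs

theorem foldl_nsum_psum (l : List Int) (a b : Int) :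
    l.foldl (fun acc x => if x < 0 then (acc.1 + x, acc.2) else (acc.1, acc.2 + x)) (a, b)
      = (a + nsum l, b + psum l) := by
  induction l generalizing a b with
  | nil => simp [nsum, psum]
  | cons x xs ih =>
    simp only [List.foldl_cons, nsum, psum]
    by_cases h : x < 0 <;> simp [h, ih] <;> ring_nf

theorem sucet2_alt_eq (l : List Int) : sucet2_alt l = (nsum l, psum l) := by
  simpa using foldl_nsum_psum l 0 0

theorem nsum_append (l1 l2 : List Int) : nsum (l1 ++ l2) = nsum l1 + nsum l2 := by
  induction l1 with
  | nil => simp [nsum]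
  | cons x xs ih => simp [nsum, ih]; ring

theorem psum_append (l1 l2 : List Int) : psum (l1 ++ l2) = psum l1 + psum l2 := by
  induction l1 with
  | nil => simp [psum]
  | cons x xs ih => simp [psum, ih]; ring

theorem sucet2_eq (l : List Int) : sucet2 l = (nsum l, psum l) := by
  fun_induction sucet2 l with
  | case1 l h0 =>
    have : l = [] := List.length_eq_zero_iff.mp h0
    subst this; simp [nsum, psum]
  | case2 l h0 h1 x hget hx =>
    obtain ⟨y, hy⟩ := List.length_eq_one_iff.mp h1
    subst hy
    simp [PySem.List.pyGet?, PySem.List.pyIdx?] at hget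
    subst hget
    simp [nsum, psum, hx]
  | case3 l h0 h1 x hget hx =>
    obtain ⟨y, hy⟩ := List.length_eq_one_iff.mp h1
    subst hy
    simp [PySem.List.pyGet?, PySem.List.pyIdx?] at hget
    subst hget
    simp [nsum, psum, hx]
  | case4 l h0 h1 hget =>
    obtain ⟨y, hy⟩ := List.length_eq_one_iff.mp h1
    subst hy
    simp [PySem.List.pyGet?, PySem.List.pyIdx?] at hget
  | case5 l h0 h1 stred prva druha ih1 ih2 =>
    have hb : (0:Int) ≤ stred := by
      simp only [stred, PySem.Int.floordiv_eq_ediv_of_pos (show (0:Int) < 2 by omega)]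
      positivity
    simp only [prva, druha]
    rw [ih1, ih2]
    have hsplit : PySem.List.slice l none (some stred)
        ++ PySem.List.slice l (some stred) none = l := by
      rw [PySem.List.slice_to l hb, PySem.List.slice_from l hb]
      exact List.take_append_drop _ l
    have hn := nsum_append (PySem.List.slice l none (some stred))
        (PySem.List.slice l (some stred) none)
    have hp := psum_append (PySem.List.slice l none (some stred))
        (PySem.List.slice l (some stred) none)
    rw [hsplit] at hn hp
    simp only [Prod.mk.injEq]
    constructor <;> omega

-- ===== VERDICT (by name: the statement is the Claim_ definition above) =====
theorem sucet2_spec : Claim_equal_sucet2 := by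
  intro zoznam _
  unfold Spec_sucet2
  rw [sucet2_eq, sucet2_alt_eq]
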